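-- pv_equiv track=rewrite | github.com/blisswisdom-students/blisswisdom-roll-call-assistant | packages/blisswisdom_roll_call_assistant_sdk/attendance.py | convert_to_name
-- ===== SOURCE A (Python) =====
-- def convert_to_name(text: str) -> str:
--     c: str
--     for c in '[':
--         if c in text:
--             text = text[text.index(c) + 1:]
--     for c in '](（':
--         if c in text:
--             text = text[:text.index(c)]
--     return text.strip()
-- ===== SOURCE B (Python) =====
-- def convert_to_name(text: str) -> str:
--     out = []
--     for ch in text[text.find('[') + 1:]:
--         if ch in '](（':
--             break
--         out.append(ch)
--     return ''.join(out).strip()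
-- ===== Notes on version B (the rewrite author's own statement) =====
-- stated objective: alternative
-- what changed: Replaces A's staged slicing passes (a membership test + index + slice per bracket character) by a single streaming pass: start just past the first opening bracket (via find, no membership test), then build the output character by character in an accumulator, breaking at the first closing character; no closing-character index is ever computed and no tail slice is taken.
import Mathlib
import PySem

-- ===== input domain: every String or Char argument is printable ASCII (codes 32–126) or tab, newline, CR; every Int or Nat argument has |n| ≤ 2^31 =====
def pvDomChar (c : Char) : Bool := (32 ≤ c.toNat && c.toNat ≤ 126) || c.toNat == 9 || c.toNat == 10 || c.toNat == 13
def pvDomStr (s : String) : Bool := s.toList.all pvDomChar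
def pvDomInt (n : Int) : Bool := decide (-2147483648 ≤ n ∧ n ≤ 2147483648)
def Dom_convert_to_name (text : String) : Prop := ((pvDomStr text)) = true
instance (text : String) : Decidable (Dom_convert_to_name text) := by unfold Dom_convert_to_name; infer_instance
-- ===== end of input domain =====

-- B replaces A's staged slicing passes by one streaming pass that builds the output
-- char by char in an accumulator, breaking at the first closing character
-- (alternative decomposition, same cost).

-- ===== PORT A =====
-- literal transliteration of A: for c in '[': …; for c in '](（': …; return text.strip()
def convert_to_name (text : String) : String :=
  let t1 := "[".toList.foldl (fun t c =>
      if PySem.Str.isIn (String.singleton c) t then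
        PySem.Str.slice t (some (PySem.Str.find t (String.singleton c) + 1)) none
      else t) text
  let t2 := "](（".toList.foldl (fun t c =>
      if PySem.Str.isIn (String.singleton c) t then
        PySem.Str.slice t none (some (PySem.Str.find t (String.singleton c)))
      else t) t1
  PySem.Str.strip t2

-- ===== PORT B =====
-- the accumulator loop with break: collect characters until the first closing character
def pvCollect : List Char → List Char
  | [] => []
  | c :: cs => if PySem.Str.isIn (String.singleton c) "](（" then [] else c :: pvCollect cs

-- literal transliteration of B: iterate over text[text.find('[') + 1:], break at a closer,
-- join the accumulated characters, strip
def convert_to_name_alt (text : String) : String :=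
  let rest := PySem.Str.slice text (some (PySem.Str.find text "[" + 1)) none
  PySem.Str.strip (String.ofList (pvCollect rest.toList))

-- ===== PRECONDITION & SPEC =====
def Spec_convert_to_name (text : String) (out : String) : Prop := out = convert_to_name_alt text
instance (text : String) (out : String) : Decidable (Spec_convert_to_name text out) := by unfold Spec_convert_to_name; infer_instance

-- ===== CLAIM (what is proved, stated in full; the proofs are below) =====
def Claim_equal_convert_to_name : Prop := ∀ (text : String), Dom_convert_to_name text → Spec_convert_to_name text (convert_to_name text)

-- ===== LEMMAS AND PROOFS =====

-- [c] is an infix of t iff c is an element of t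
lemma pv_singleton_infix (c : Char) (t : List Char) : [c] <:+: t ↔ c ∈ t := by
  constructor
  · intro h; exact h.subset (by simp)
  · intro h
    obtain ⟨l1, l2, rfl⟩ := List.append_of_mem h
    exact ⟨l1, l2, by simp⟩

lemma pv_isIn_single (c : Char) (t : List Char) : PySem.Chars.isIn [c] t = true ↔ c ∈ t := by
  rw [PySem.Chars.isIn_iff_infix]; exact pv_singleton_infix c t

-- take up to the first failure of p is takeWhile p
lemma pv_take_eq_takeWhile (p : Char → Bool) : ∀ (t : List Char) (k : Nat) (hk : k < t.length),
    (∀ j (hj : j < k), p (t[j]'(by omega)) = true) → p (t[k]'hk) = false →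
    t.take k = t.takeWhile p := by
  intro t
  induction t with
  | nil => intro k hk _ _; simp at hk
  | cons x t ih =>
    intro k hk hbef hat
    cases k with
    | zero =>
      simp only [List.getElem_cons_zero] at hat
      simp [hat]
    | succ k =>
      have hx : p x = true := by
        have := hbef 0 (Nat.succ_pos k); simpa using this
      have hk' : k < t.length := by simpa using hk
      have hrec := ih k hk' (fun j hj => by
          have := hbef (j+1) (by omega); simpa using this)
        (by simpa using hat)
      simp [List.take_succ_cons, hx, hrec]

-- one cut of A's loop is a takeWhile
lemma pv_cut_eq (t : List Char) (c : Char) :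
    (if PySem.Chars.isIn [c] t then PySem.List.slice t none (some (PySem.Chars.find t [c])) else t)
      = t.takeWhile (fun x => !(x == c)) := by
  by_cases h : PySem.Chars.isIn [c] t
  · rw [if_pos h]
    have hinf : [c] <:+: t := (PySem.Chars.isIn_iff_infix _ _).mp h
    have h0 : 0 ≤ PySem.Chars.find t [c] := (PySem.Chars.find_nonneg_iff t [c]).mpr hinf
    rw [PySem.List.slice_to t h0]
    obtain ⟨hpre, hmin⟩ := PySem.Chars.find_spec h0
    set k := (PySem.Chars.find t [c]).toNat with hkdef
    obtain ⟨u, hu⟩ := hpre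
    have hne : t.drop k ≠ [] := by rw [← hu]; simp
    have hk : k < t.length := by
      have hlen : 0 < (t.drop k).length := List.length_pos_iff.mpr hne
      rw [List.length_drop] at hlen; omega
    have hat : t[k] = c := by
      have hd := List.drop_eq_getElem_cons hk
      rw [hd] at hu
      exact (List.cons.injEq _ _ _ _ ▸ hu.symm).1
    have hbef : ∀ j (hj : j < k), t[j]'(by omega) ≠ c := by
      intro j hj hcontra
      exact hmin j hj ⟨t.drop (j+1), by
        rw [List.drop_eq_getElem_cons (by omega : j < t.length), hcontra]; simp⟩
    exact pv_take_eq_takeWhile _ t k hk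
      (fun j hj => by simp [hbef j hj]) (by simp [hat])
  · rw [if_neg h]
    have hnot : c ∉ t := fun hc => h ((pv_isIn_single c t).mpr hc)
    symm
    rw [List.takeWhile_eq_self_iff]
    intro x hx
    simp only [Bool.not_eq_eq_eq_not, Bool.not_true, beq_eq_false_iff_ne]
    exact fun he => hnot (he ▸ hx)

-- A's whole loop is a takeWhile on the complement of the cut set
lemma pv_fold_cut (cs : List Char) : ∀ (t : List Char),
    cs.foldl (fun t c =>
        if PySem.Chars.isIn [c] t then PySem.List.slice t none (some (PySem.Chars.find t [c])) else t) t
      = t.takeWhile (fun x => !(cs.contains x)) := by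
  induction cs with
  | nil =>
    intro t
    rw [List.foldl_nil]
    symm
    rw [List.takeWhile_eq_self_iff]
    intro x _; simp
  | cons c cs ih =>
    intro t
    rw [List.foldl_cons, pv_cut_eq, ih, List.takeWhile_takeWhile]
    congr 1
    funext a
    by_cases hac : a = c <;> simp [hac]

-- string-level fold of A's cut loop computes the list-level fold
lemma pv_foldA_toList : ∀ (cs : List Char) (u : String),
    (cs.foldl (fun t c =>
        if PySem.Str.isIn (String.singleton c) t then
          PySem.Str.slice t none (some (PySem.Str.find t (String.singleton c)))
        else t) u).toList
      = cs.foldl (fun t c =>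
          if PySem.Chars.isIn [c] t then PySem.List.slice t none (some (PySem.Chars.find t [c])) else t)
        u.toList := by
  intro cs
  induction cs with
  | nil => intro u; rfl
  | cons c cs ih =>
    intro u
    rw [List.foldl_cons, List.foldl_cons, ih]
    congr 1
    by_cases h : PySem.Chars.isIn [c] u.toList
    · rw [if_pos (by simpa [PySem.Str.isIn, String.toList_singleton] using h), if_pos h]
      simp [PySem.Str.toList_slice, PySem.Str.find, String.toList_singleton]
    · rw [if_neg (by simpa [PySem.Str.isIn, String.toList_singleton] using h), if_neg h]

-- membership in the character list is the contains test
lemma pv_isIn_eq_contains (L : List Char) (x : Char) :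
    PySem.Chars.isIn [x] L = L.contains x := by
  by_cases hx : x ∈ L
  · rw [(pv_isIn_single x L).mpr hx]
    exact (List.contains_iff_mem.mpr hx).symm
  · rw [Bool.eq_iff_iff]
    constructor
    · intro h; exact absurd ((pv_isIn_single x L).mp h) hx
    · intro h; exact absurd (List.contains_iff_mem.mp h) hx

-- A's second loop, at string level, is the takeWhile
lemma pv_Aside (u : String) :
    ("](（".toList.foldl (fun t c =>
        if PySem.Str.isIn (String.singleton c) t then
          PySem.Str.slice t none (some (PySem.Str.find t (String.singleton c)))
        else t) u).toList
      = u.toList.takeWhile (fun x => !("](（".toList.contains x)) := by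
  rw [pv_foldA_toList, pv_fold_cut]

-- B's accumulator loop is the same takeWhile
lemma pv_collect_eq (l : List Char) :
    pvCollect l = l.takeWhile (fun x => !("](（".toList.contains x)) := by
  induction l with
  | nil => rfl
  | cons c cs ih =>
    unfold pvCollect
    have hiff : PySem.Str.isIn (String.singleton c) "](（" = "](（".toList.contains c := by
      rw [show PySem.Str.isIn (String.singleton c) "](（"
            = PySem.Chars.isIn [c] "](（".toList by
          simp [PySem.Str.isIn, String.toList_singleton]]
      exact pv_isIn_eq_contains _ c
    rw [hiff]
    by_cases h1 : c = ']' <;> by_cases h2 : c = '(' <;> by_cases h3 : c = '（' <;>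
      simp [h1, h2, h3, ih]

-- A's first-loop result and B's slice-from-find+1 have the same character list
lemma pv_first (text : String) :
    ("[".toList.foldl (fun t c =>
        if PySem.Str.isIn (String.singleton c) t then
          PySem.Str.slice t (some (PySem.Str.find t (String.singleton c) + 1)) none
        else t) text).toList
      = (PySem.Str.slice text (some (PySem.Str.find text "[" + 1)) none).toList := by
  rw [show "[".toList = ['['] from rfl, List.foldl_cons, List.foldl_nil]
  by_cases h : PySem.Chars.isIn ['['] text.toList
  · rw [if_pos (by simpa [PySem.Str.isIn, String.toList_singleton] using h)]
    simp [PySem.Str.find, show String.singleton '[' = "[" from rfl]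
  · rw [if_neg (by simpa [PySem.Str.isIn, String.toList_singleton] using h)]
    have hneg : PySem.Str.find text "[" = -1 := by
      rw [PySem.Str.find_eq_neg_one_iff]
      simpa [PySem.Chars.isIn_iff_infix] using h
    rw [PySem.Str.toList_slice, hneg]
    norm_num

-- ===== VERDICT (by name: the statement is the Claim_ definition above) =====
theorem convert_to_name_spec : Claim_equal_convert_to_name := by
  intro text _
  unfold Spec_convert_to_name convert_to_name convert_to_name_alt
  apply String.ext
  simp only [PySem.Str.toList_strip]
  rw [pv_Aside, pv_collect_eq, pv_first]
  simp [String.toList_ofList]
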